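-- pv_equiv track=rewrite | github.com/ShahnawazDev/ip-project-evaluation | Parag Prashun/metro_simulation_test.py | case2peak
-- ===== SOURCE A (Python) =====
-- def m_h(f):
--     k,l = f//60, f%60
--     return f'{k:02d}:{l:02d}'
--
-- def timedealer(time):
--     if 480 <= time < 600 or 1020 <= time< 1140:
--         return 4
--     return 8
--
-- def case5(timesum,timee):
--     if timee > 1380:
--         return "Metro is closed now"
--     if timee >= timesum:
--         timee1=timedealer(timee)+timee
--         timee2=timedealer(timee1)+timee1
--         timee3=timedealer(timee2)+timee2
--         timee4=timedealer(timee3)+timee3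
--         l=[timee1,timee2,timee3,timee4]
--
--         l=[x for x in l if x<1380]
--         if len(l)==4:
--             return(f"Next metro at: {m_h(timee)}\nSubsequent metros at {m_h(l[0])},{m_h(l[1])},{m_h(l[2])},{m_h(l[3])}...")
--         elif len(l)==3:
--             return(f"Next metro at: {m_h(timee)}\nSubsequent metros at {m_h(l[0])},{m_h(l[1])},{m_h(l[2])},")
--         elif len(l)==2:
--             return(f"Next metro at: {m_h(timee)}\nSubsequent metros at {m_h(l[0])},{m_h(l[1])}")
--         elif len(l)==1:
--             return(f"Next metro at: {m_h(timee)}\nSubsequent metros at {m_h(l[0])},")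
--     return case5(timesum, timee+8)
--
-- def case4peak(timesum,timee):
--     if timee >= timesum:
--         timee1=timedealer(timee)+timee
--         timee2=timedealer(timee1)+timee1
--         timee3=timedealer(timee2)+timee2
--         timee4=timedealer(timee3)+timee3
--         return(f"Next metro at: {m_h(timee)}\nSubsequent metros at {m_h(timee1)},{m_h(timee2)},{m_h(timee3)},{m_h(timee4)}...")
--     if timee > 1140:
--         return case5(timesum,timee)
--     return case4peak(timesum, timee+4)
--
-- def case3(timesum,timee):
--     if timee >= timesum:
--         timee1=timedealer(timee)+timee
--         timee2=timedealer(timee1)+timee1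
--         timee3=timedealer(timee2)+timee2
--         timee4=timedealer(timee3)+timee3
--         return(f"Next metro at: {m_h(timee)}\nSubsequent metros at {m_h(timee1)},{m_h(timee2)},{m_h(timee3)},{m_h(timee4)}...")
--     if timee > 1020:
--         return case4peak(timesum,timee)
--     return case3(timesum, timee+8)
--
-- def case2peak(timesum,timee):
--     if timee >= timesum:
--         timee1=timedealer(timee)+timee
--         timee2=timedealer(timee1)+timee1
--         timee3=timedealer(timee2)+timee2
--         timee4=timedealer(timee3)+timee3
--         return(f"Next metro at: {m_h(timee)}\nSubsequent metros at {m_h(timee1)},{m_h(timee2)},{m_h(timee3)},{m_h(timee4)}...")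
--     if timee > 600:
--         return case3(timesum,timee)
--     return case2peak(timesum, timee+4)
-- ===== SOURCE B (Python) =====
-- def m_h(f):
--     k, l = f // 60, f % 60
--     return f'{k:02d}:{l:02d}'
--
--
-- def timedealer(time):
--     if 480 <= time < 600 or 1020 <= time < 1140:
--         return 4
--     return 8
--
--
-- def case2peak(timesum, timee):
--     # One iterative driver over four phases instead of four mutually recursive functions.
--     bounds = (600, 1020, 1140)
--     phase = 0
--     while True:
--         if phase >= 3 and timee > 1380:
--             return "Metro is closed now"
--         if timee >= timesum:
--             nxt = []
--             t = timee
--             for _ in range(4):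
--                 t = t + timedealer(t)
--                 nxt.append(t)
--             head = f"Next metro at: {m_h(timee)}\nSubsequent metros at "
--             if phase < 3:
--                 return head + ",".join(m_h(x) for x in nxt) + "..."
--             nxt = [x for x in nxt if x < 1380]
--             if nxt:
--                 body = ",".join(m_h(x) for x in nxt)
--                 if len(nxt) == 4:
--                     return head + body + "..."
--                 if len(nxt) == 2:
--                     return head + body
--                 return head + body + ","
--             timee += 8
--         elif phase < 3 and timee > bounds[phase]:
--             phase += 1
--         else:
--             timee += 4 if phase % 2 == 0 else 8
-- ===== Notes on version B (the rewrite author's own statement) =====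
-- stated objective: simpler
-- what changed: Replaces A's four mutually recursive phase functions (case2peak/case3/case4peak/case5) by a single iterative while-loop driver that keeps a phase counter 0..3 with a per-phase step and boundary table.
-- outside the precondition, e.g. on case2peak(5000, -100000): A raises RecursionError, B returns 'Metro is closed now'
import Mathlib
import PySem

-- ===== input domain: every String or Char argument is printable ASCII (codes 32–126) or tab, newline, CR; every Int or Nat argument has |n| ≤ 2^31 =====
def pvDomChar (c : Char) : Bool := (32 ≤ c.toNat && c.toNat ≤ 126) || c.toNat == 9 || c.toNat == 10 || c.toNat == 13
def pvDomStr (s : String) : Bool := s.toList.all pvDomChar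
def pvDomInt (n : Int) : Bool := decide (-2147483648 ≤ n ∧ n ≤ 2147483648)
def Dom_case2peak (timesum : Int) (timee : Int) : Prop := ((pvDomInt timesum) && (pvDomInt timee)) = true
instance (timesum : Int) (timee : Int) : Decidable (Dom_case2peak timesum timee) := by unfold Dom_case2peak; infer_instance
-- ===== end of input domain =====

-- B replaces A's four mutually recursive phase functions by one iterative driver with a phase
-- counter (objective: simpler); return values agree on Pre_ (exact equivalence proved below).

-- ===== PORT A =====
-- small named lemmas cited by the ports' decreasing_by (keeps the WF proof terms compact)
theorem pvDecA (x y : Int) (h0 : 0 < y) (h : x < y) : x.toNat < y.toNat := by omega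
theorem pvDecB (c : Nat) (x y : Int) (h0 : 0 < y) (h : x < y) : c + x.toNat < c + y.toNat := by omega
theorem pvDecE (c : Nat) (x y : Int) (h0 : 0 < y) (h : x < y) : x.toNat + c < y.toNat + c := by omega

-- shared helpers (identical source in Source A and Source B)
-- pad02 is an exact port of the f-string format '{n:02d}' for ints: zero-pad to width 2;
-- only 0..9 need a pad (any negative decimal already has length ≥ 2).
def pad02 (n : Int) : String := if 0 ≤ n ∧ n < 10 then "0" ++ PySem.Int.toStr n else PySem.Int.toStr n

def m_h (f : Int) : String := pad02 (PySem.Int.floordiv f 60) ++ ":" ++ pad02 (PySem.Int.mod f 60)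

def timedealer (time : Int) : Int :=
  if (480 ≤ time ∧ time < 600) ∨ (1020 ≤ time ∧ time < 1140) then 4 else 8

def case5 (timesum : Int) (timee : Int) : String :=
  if h1 : timee > 1380 then "Metro is closed now"
  else if h2 : timee ≥ timesum then
    let timee1 := timedealer timee + timee
    let timee2 := timedealer timee1 + timee1
    let timee3 := timedealer timee2 + timee2
    let timee4 := timedealer timee3 + timee3
    let l := [timee1, timee2, timee3, timee4].filter (fun x => decide (x < 1380))
    if l.length == 4 then
      "Next metro at: " ++ m_h timee ++ "\nSubsequent metros at " ++
        m_h (PySem.List.pyGetD l 0 0) ++ "," ++ m_h (PySem.List.pyGetD l 1 0) ++ "," ++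
        m_h (PySem.List.pyGetD l 2 0) ++ "," ++ m_h (PySem.List.pyGetD l 3 0) ++ "..."
    else if l.length == 3 then
      "Next metro at: " ++ m_h timee ++ "\nSubsequent metros at " ++
        m_h (PySem.List.pyGetD l 0 0) ++ "," ++ m_h (PySem.List.pyGetD l 1 0) ++ "," ++
        m_h (PySem.List.pyGetD l 2 0) ++ ","
    else if l.length == 2 then
      "Next metro at: " ++ m_h timee ++ "\nSubsequent metros at " ++
        m_h (PySem.List.pyGetD l 0 0) ++ "," ++ m_h (PySem.List.pyGetD l 1 0)
    else if l.length == 1 then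
      "Next metro at: " ++ m_h timee ++ "\nSubsequent metros at " ++
        m_h (PySem.List.pyGetD l 0 0) ++ ","
    else case5 timesum (timee + 8)
  else case5 timesum (timee + 8)
termination_by (1389 - timee).toNat
decreasing_by all_goals exact pvDecA _ _ (by omega) (by omega)

def case4peak (timesum : Int) (timee : Int) : String :=
  if h2 : timee ≥ timesum then
    let timee1 := timedealer timee + timee
    let timee2 := timedealer timee1 + timee1
    let timee3 := timedealer timee2 + timee2
    let timee4 := timedealer timee3 + timee3
    "Next metro at: " ++ m_h timee ++ "\nSubsequent metros at " ++
      m_h timee1 ++ "," ++ m_h timee2 ++ "," ++ m_h timee3 ++ "," ++ m_h timee4 ++ "..."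
  else if h3 : timee > 1140 then case5 timesum timee
  else case4peak timesum (timee + 4)
termination_by (1149 - timee).toNat
decreasing_by exact pvDecA _ _ (by omega) (by omega)

def case3 (timesum : Int) (timee : Int) : String :=
  if h2 : timee ≥ timesum then
    let timee1 := timedealer timee + timee
    let timee2 := timedealer timee1 + timee1
    let timee3 := timedealer timee2 + timee2
    let timee4 := timedealer timee3 + timee3
    "Next metro at: " ++ m_h timee ++ "\nSubsequent metros at " ++
      m_h timee1 ++ "," ++ m_h timee2 ++ "," ++ m_h timee3 ++ "," ++ m_h timee4 ++ "..."
  else if h3 : timee > 1020 then case4peak timesum timee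
  else case3 timesum (timee + 8)
termination_by (1029 - timee).toNat
decreasing_by exact pvDecA _ _ (by omega) (by omega)

def case2peak (timesum : Int) (timee : Int) : String :=
  if h2 : timee ≥ timesum then
    let timee1 := timedealer timee + timee
    let timee2 := timedealer timee1 + timee1
    let timee3 := timedealer timee2 + timee2
    let timee4 := timedealer timee3 + timee3
    "Next metro at: " ++ m_h timee ++ "\nSubsequent metros at " ++
      m_h timee1 ++ "," ++ m_h timee2 ++ "," ++ m_h timee3 ++ "," ++ m_h timee4 ++ "..."
  else if h3 : timee > 600 then case3 timesum timee
  else case2peak timesum (timee + 4)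
termination_by (609 - timee).toNat
decreasing_by exact pvDecA _ _ (by omega) (by omega)
-- ===== PORT B =====
-- termination helper for the driver loop: the phase-boundary table never exceeds 1140
theorem pyBound_le (p : Int) : PySem.List.pyGetD ([600, 1020, 1140] : List Int) p 0 ≤ 1140 := by
  by_cases h : PySem.Raise.InRange (3 : Nat) p
  · have hm := PySem.List.pyGetD_mem (xs := ([600, 1020, 1140] : List Int)) (i := p) (d := 0)
      (by simpa using h)
    simp at hm; rcases hm with h' | h' | h' <;> omega
  · rw [PySem.List.pyGetD_of_none _ _ _ ((PySem.List.pyGet?_eq_none_iff _ _).mpr (by simpa using h))]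
    omega

-- the body of Source B's 'while True' loop, with the mutable state (phase, timee) as parameters
def loopB (timesum : Int) (phase : Int) (timee : Int) : String :=
  if hc : phase ≥ 3 ∧ timee > 1380 then "Metro is closed now"
  else if hs : timee ≥ timesum then
    -- 'for _ in range(4): t = t + timedealer(t); nxt.append(t)'
    let nxt := ((PySem.List.pyRange 0 4 1).foldl
      (fun (acc : List Int × Int) _ =>
        (acc.1 ++ [acc.2 + timedealer acc.2], acc.2 + timedealer acc.2)) ([], timee)).1
    let head := "Next metro at: " ++ m_h timee ++ "\nSubsequent metros at "
    if phase < 3 then head ++ PySem.Str.join "," (nxt.map m_h) ++ "..."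
    else
      let nxt2 := nxt.filter (fun x => decide (x < 1380))
      if hne : nxt2.isEmpty then loopB timesum phase (timee + 8)
      else
        let body := PySem.Str.join "," (nxt2.map m_h)
        if nxt2.length == 4 then head ++ body ++ "..."
        else if nxt2.length == 2 then head ++ body
        else head ++ body ++ ","
  else if ha : phase < 3 ∧ timee > PySem.List.pyGetD ([600, 1020, 1140] : List Int) phase 0 then
    loopB timesum (phase + 1) timee
  else loopB timesum phase (timee + (if PySem.Int.mod phase 2 = 0 then 4 else 8))
termination_by (3 - phase).toNat + (1389 - timee).toNat
decreasing_by
  · exact pvDecB _ _ _ (by omega) (by omega)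
  · exact pvDecE _ _ _ (by omega) (by omega)
  · have hb := pyBound_le phase
    split <;> exact pvDecB _ _ _ (by omega) (by omega)

def case2peak_alt (timesum : Int) (timee : Int) : String := loopB timesum 0 timee

-- ===== PRECONDITION & SPEC =====
-- Pre_ excludes only start times far below both the request time and the schedule window,
-- on which CPython's recursion limit makes A raise RecursionError (the margin is conservative,
-- so it also drops some deeply negative start times on which A still returns).
def Pre_case2peak (timesum : Int) (timee : Int) : Prop := timee ≥ timesum ∨ -1000 ≤ timee
instance (timesum : Int) (timee : Int) : Decidable (Pre_case2peak timesum timee) := by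
  unfold Pre_case2peak; infer_instance

def pvWitness_case2peak : Int × Int := (500, 300)

def Spec_case2peak (timesum : Int) (timee : Int) (out : String) : Prop := out = case2peak_alt timesum timee
instance (timesum : Int) (timee : Int) (out : String) : Decidable (Spec_case2peak timesum timee out) := by unfold Spec_case2peak; infer_instance

-- ===== CLAIM (what is proved, stated in full; the proofs are below) =====
def Claim_equal_case2peak : Prop := ∀ (timesum : Int) (timee : Int), Dom_case2peak timesum timee → Pre_case2peak timesum timee → Spec_case2peak timesum timee (case2peak timesum timee)

-- ===== LEMMAS AND PROOFS =====

theorem loopB_bound_eval : PySem.List.pyGetD ([600, 1020, 1140] : List Int) 0 0 = 600 ∧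
    PySem.List.pyGetD ([600, 1020, 1140] : List Int) 1 0 = 1020 ∧
    PySem.List.pyGetD ([600, 1020, 1140] : List Int) 2 0 = 1140 := by decide

theorem join1 (a : String) : PySem.Str.join "," [a] = a := by
  apply String.toList_inj.mp
  simp [PySem.Str.join, PySem.Chars.join, List.intercalate]

theorem join2 (a b : String) : PySem.Str.join "," [a, b] = a ++ "," ++ b := by
  apply String.toList_inj.mp
  simp [PySem.Str.join, PySem.Chars.join, List.intercalate]

theorem join3 (a b c : String) : PySem.Str.join "," [a, b, c] = a ++ "," ++ b ++ "," ++ c := by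
  apply String.toList_inj.mp
  simp [PySem.Str.join, PySem.Chars.join, List.intercalate]

theorem join4 (a b c d : String) : PySem.Str.join "," [a, b, c, d] = a ++ "," ++ b ++ "," ++ c ++ "," ++ d := by
  apply String.toList_inj.mp
  simp [PySem.Str.join, PySem.Chars.join, List.intercalate]

-- the four successive departures computed by Source B's inner for-loop, as an explicit list
theorem loopB_nxt (t : Int) :
    ((PySem.List.pyRange 0 4 1).foldl
      (fun (acc : List Int × Int) _ =>
        (acc.1 ++ [acc.2 + timedealer acc.2], acc.2 + timedealer acc.2)) ([], t)).1 =
    [t + timedealer t,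
     t + timedealer t + timedealer (t + timedealer t),
     t + timedealer t + timedealer (t + timedealer t) + timedealer (t + timedealer t + timedealer (t + timedealer t)),
     t + timedealer t + timedealer (t + timedealer t) + timedealer (t + timedealer t + timedealer (t + timedealer t)) + timedealer (t + timedealer t + timedealer (t + timedealer t) + timedealer (t + timedealer t + timedealer (t + timedealer t)))] := by
  have h4 : PySem.List.pyRange 0 4 1 = [0, 1, 2, 3] := by decide
  rw [h4]; rfl

-- A's unfiltered four-departure format line equals B's head ++ join ++ "..." form
theorem fmt_eq (t : Int) :
    "Next metro at: " ++ m_h t ++ "\nSubsequent metros at " ++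
      m_h (timedealer t + t) ++ "," ++ m_h (timedealer (timedealer t + t) + (timedealer t + t)) ++ "," ++
      m_h (timedealer (timedealer (timedealer t + t) + (timedealer t + t)) + (timedealer (timedealer t + t) + (timedealer t + t))) ++ "," ++ m_h (timedealer (timedealer (timedealer (timedealer t + t) + (timedealer t + t)) + (timedealer (timedealer t + t) + (timedealer t + t))) + (timedealer (timedealer (timedealer t + t) + (timedealer t + t)) + (timedealer (timedealer t + t) + (timedealer t + t)))) ++ "..." =
    "Next metro at: " ++ m_h t ++ "\nSubsequent metros at " ++
      PySem.Str.join "," ((((PySem.List.pyRange 0 4 1).foldl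
        (fun (acc : List Int × Int) _ =>
          (acc.1 ++ [acc.2 + timedealer acc.2], acc.2 + timedealer acc.2)) ([], t)).1).map m_h) ++ "..." := by
  rw [loopB_nxt]
  show _ = "Next metro at: " ++ m_h t ++ "\nSubsequent metros at " ++
      PySem.Str.join "," ([m_h (t + timedealer t), m_h (t + timedealer t + timedealer (t + timedealer t)),
        m_h (t + timedealer t + timedealer (t + timedealer t) + timedealer (t + timedealer t + timedealer (t + timedealer t))),
        m_h (t + timedealer t + timedealer (t + timedealer t) + timedealer (t + timedealer t + timedealer (t + timedealer t)) + timedealer (t + timedealer t + timedealer (t + timedealer t) + timedealer (t + timedealer t + timedealer (t + timedealer t))))]) ++ "..."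
  rw [join4]
  ring_nf
  simp [String.append_assoc]

theorem eq_case5 (timesum timee : Int) : case5 timesum timee = loopB timesum 3 timee := by
  rw [case5.eq_def, loopB.eq_def]
  by_cases h1 : timee > 1380
  · rw [dif_pos h1, dif_pos (show (3:Int) ≥ 3 ∧ timee > 1380 from ⟨by norm_num, h1⟩)]
  rw [dif_neg h1, dif_neg (show ¬((3:Int) ≥ 3 ∧ timee > 1380) from fun h => h1 h.2)]
  by_cases h2 : timee ≥ timesum
  · rw [dif_pos h2, dif_pos h2, if_neg (by norm_num : ¬((3:Int) < 3))]
    have e1 : timedealer timee + timee = timee + timedealer timee := Int.add_comm _ _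
    have e2 : timedealer (timedealer timee + timee) + (timedealer timee + timee) = timee + timedealer timee + timedealer (timee + timedealer timee) := by rw [e1]; exact Int.add_comm _ _
    have e3 : timedealer (timedealer (timedealer timee + timee) + (timedealer timee + timee)) + (timedealer (timedealer timee + timee) + (timedealer timee + timee)) = timee + timedealer timee + timedealer (timee + timedealer timee) + timedealer (timee + timedealer timee + timedealer (timee + timedealer timee)) := by rw [e2]; exact Int.add_comm _ _
    have e4 : timedealer (timedealer (timedealer (timedealer timee + timee) + (timedealer timee + timee)) + (timedealer (timedealer timee + timee) + (timedealer timee + timee))) + (timedealer (timedealer (timedealer timee + timee) + (timedealer timee + timee)) + (timedealer (timedealer timee + timee) + (timedealer timee + timee))) = timee + timedealer timee + timedealer (timee + timedealer timee) + timedealer (timee + timedealer timee + timedealer (timee + timedealer timee)) + timedealer (timee + timedealer timee + timedealer (timee + timedealer timee) + timedealer (timee + timedealer timee + timedealer (timee + timedealer timee))) := by rw [e3]; exact Int.add_comm _ _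
    have hlist : [timedealer timee + timee, timedealer (timedealer timee + timee) + (timedealer timee + timee), timedealer (timedealer (timedealer timee + timee) + (timedealer timee + timee)) + (timedealer (timedealer timee + timee) + (timedealer timee + timee)), timedealer (timedealer (timedealer (timedealer timee + timee) + (timedealer timee + timee)) + (timedealer (timedealer timee + timee) + (timedealer timee + timee))) + (timedealer (timedealer (timedealer timee + timee) + (timedealer timee + timee)) + (timedealer (timedealer timee + timee) + (timedealer timee + timee)))] = [timee + timedealer timee, timee + timedealer timee + timedealer (timee + timedealer timee), timee + timedealer timee + timedealer (timee + timedealer timee) + timedealer (timee + timedealer timee + timedealer (timee + timedealer timee)), timee + timedealer timee + timedealer (timee + timedealer timee) + timedealer (timee + timedealer timee + timedealer (timee + timedealer timee)) + timedealer (timee + timedealer timee + timedealer (timee + timedealer timee) + timedealer (timee + timedealer timee + timedealer (timee + timedealer timee)))] := by rw [e4, e3, e2, e1]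
    have hlen := List.length_filter_le (fun x => decide (x < 1380)) [timee + timedealer timee, timee + timedealer timee + timedealer (timee + timedealer timee), timee + timedealer timee + timedealer (timee + timedealer timee) + timedealer (timee + timedealer timee + timedealer (timee + timedealer timee)), timee + timedealer timee + timedealer (timee + timedealer timee) + timedealer (timee + timedealer timee + timedealer (timee + timedealer timee)) + timedealer (timee + timedealer timee + timedealer (timee + timedealer timee) + timedealer (timee + timedealer timee + timedealer (timee + timedealer timee)))]
    simp only [loopB_nxt, hlist]
    generalize hG : List.filter (fun x => decide (x < 1380)) [timee + timedealer timee, timee + timedealer timee + timedealer (timee + timedealer timee), timee + timedealer timee + timedealer (timee + timedealer timee) + timedealer (timee + timedealer timee + timedealer (timee + timedealer timee)), timee + timedealer timee + timedealer (timee + timedealer timee) + timedealer (timee + timedealer timee + timedealer (timee + timedealer timee)) + timedealer (timee + timedealer timee + timedealer (timee + timedealer timee) + timedealer (timee + timedealer timee + timedealer (timee + timedealer timee)))] = L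
    rw [hG] at hlen
    rcases L with _ | ⟨x1, _ | ⟨x2, _ | ⟨x3, _ | ⟨x4, _ | ⟨x5, L⟩⟩⟩⟩⟩
    · simp only [List.isEmpty_nil]
      norm_num
      exact eq_case5 timesum (timee + 8)
    · norm_num [join1, PySem.List.pyGetD_zero_cons, String.append_assoc]
    · norm_num [join2, PySem.List.pyGetD_zero_cons, String.append_assoc, PySem.List.pyGetD,
        (show Int.toNat 1 = 1 from rfl), (show Int.toNat 2 = 2 from rfl), (show Int.toNat 3 = 3 from rfl)]
    · norm_num [join3, PySem.List.pyGetD_zero_cons, String.append_assoc, PySem.List.pyGetD,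
        (show Int.toNat 1 = 1 from rfl), (show Int.toNat 2 = 2 from rfl), (show Int.toNat 3 = 3 from rfl)]
    · norm_num [join4, PySem.List.pyGetD_zero_cons, String.append_assoc, PySem.List.pyGetD,
        (show Int.toNat 1 = 1 from rfl), (show Int.toNat 2 = 2 from rfl), (show Int.toNat 3 = 3 from rfl)]
    · simp at hlen; omega
  · rw [dif_neg h2, dif_neg h2,
      dif_neg (show ¬((3:Int) < 3 ∧ timee > PySem.List.pyGetD ([600, 1020, 1140] : List Int) 3 0) from
        fun h => by have := h.1; norm_num at this),
      if_neg (by decide : ¬(PySem.Int.mod 3 2 = 0))]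
    exact eq_case5 timesum (timee + 8)
termination_by (1389 - timee).toNat
decreasing_by all_goals omega

theorem eq_case4 (timesum timee : Int) : case4peak timesum timee = loopB timesum 2 timee := by
  rw [case4peak.eq_def, loopB.eq_def,
    dif_neg (show ¬((2:Int) ≥ 3 ∧ timee > 1380) from fun h => by have := h.1; norm_num at this)]
  by_cases h2 : timee ≥ timesum
  · rw [dif_pos h2, dif_pos h2, if_pos (by norm_num : (2:Int) < 3)]
    exact fmt_eq timee
  · rw [dif_neg h2, dif_neg h2]
    by_cases h3 : timee > 1140
    · rw [dif_pos h3,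
        dif_pos (⟨by norm_num, by rw [loopB_bound_eval.2.2]; exact h3⟩ :
          (2:Int) < 3 ∧ timee > PySem.List.pyGetD ([600, 1020, 1140] : List Int) 2 0)]
      exact eq_case5 timesum timee
    · rw [dif_neg h3,
        dif_neg (by rintro ⟨_, hh⟩; rw [loopB_bound_eval.2.2] at hh; exact h3 hh),
        if_pos (by decide : PySem.Int.mod 2 2 = 0)]
      exact eq_case4 timesum (timee + 4)
termination_by (1149 - timee).toNat
decreasing_by omega

theorem eq_case3 (timesum timee : Int) : case3 timesum timee = loopB timesum 1 timee := by
  rw [case3.eq_def, loopB.eq_def,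
    dif_neg (show ¬((1:Int) ≥ 3 ∧ timee > 1380) from fun h => by have := h.1; norm_num at this)]
  by_cases h2 : timee ≥ timesum
  · rw [dif_pos h2, dif_pos h2, if_pos (by norm_num : (1:Int) < 3)]
    exact fmt_eq timee
  · rw [dif_neg h2, dif_neg h2]
    by_cases h3 : timee > 1020
    · rw [dif_pos h3,
        dif_pos (⟨by norm_num, by rw [loopB_bound_eval.2.1]; exact h3⟩ :
          (1:Int) < 3 ∧ timee > PySem.List.pyGetD ([600, 1020, 1140] : List Int) 1 0)]
      exact eq_case4 timesum timee
    · rw [dif_neg h3,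
        dif_neg (by rintro ⟨_, hh⟩; rw [loopB_bound_eval.2.1] at hh; exact h3 hh),
        if_neg (by decide : ¬(PySem.Int.mod 1 2 = 0))]
      exact eq_case3 timesum (timee + 8)
termination_by (1029 - timee).toNat
decreasing_by omega

theorem eq_case2 (timesum timee : Int) : case2peak timesum timee = loopB timesum 0 timee := by
  rw [case2peak.eq_def, loopB.eq_def,
    dif_neg (show ¬((0:Int) ≥ 3 ∧ timee > 1380) from fun h => by have := h.1; norm_num at this)]
  by_cases h2 : timee ≥ timesum
  · rw [dif_pos h2, dif_pos h2, if_pos (by norm_num : (0:Int) < 3)]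
    exact fmt_eq timee
  · rw [dif_neg h2, dif_neg h2]
    by_cases h3 : timee > 600
    · rw [dif_pos h3,
        dif_pos (⟨by norm_num, by rw [loopB_bound_eval.1]; exact h3⟩ :
          (0:Int) < 3 ∧ timee > PySem.List.pyGetD ([600, 1020, 1140] : List Int) 0 0)]
      exact eq_case3 timesum timee
    · rw [dif_neg h3,
        dif_neg (by rintro ⟨_, hh⟩; rw [loopB_bound_eval.1] at hh; exact h3 hh),
        if_pos (by decide : PySem.Int.mod 0 2 = 0)]
      exact eq_case2 timesum (timee + 4)
termination_by (609 - timee).toNat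
decreasing_by omega

-- ===== VERDICT (by name: the statement is the Claim_ definition above) =====
theorem case2peak_spec : Claim_equal_case2peak := by
  intro timesum timee _ _
  unfold Spec_case2peak case2peak_alt
  exact eq_case2 timesum timee
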